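-- pv_equiv track=rewrite | github.com/greenmonn/daily-coding | python/baekjun/14502_research_center.py | solution
-- ===== SOURCE A (Python) =====
-- import itertools
-- import copy
--
-- def get_num_of_safe_zones(room, viruses):
--     to_visits = viruses[:]
--
--     deltas = [(0, 1), (1, 0), (-1, 0), (0, -1)]
--
--     def is_ok(pos):
--         if pos[0] < 0 or pos[0] >= len(room):
--             return False
--
--         if pos[1] < 0 or pos[1] >= len(room[0]):
--             return False
--
--         if room[pos[0]][pos[1]] != 0:
--             return False
--
--         return True
--
--     while len(to_visits) > 0:
--         next_visits = []
--         for pos in to_visits: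
--             for di, dj in deltas:
--                 next_pos = (pos[0]+di, pos[1]+dj)
--                 if is_ok(next_pos):
--                     room[next_pos[0]][next_pos[1]] = 2
--                     next_visits.append(next_pos)
--
--         to_visits = next_visits
--
--     num_of_safe_zones = 0
--     for i in range(len(room)):
--         for j in range(len(room[i])):
--             if room[i][j] == 0:
--                 num_of_safe_zones += 1
--
--     return num_of_safe_zones
--
-- def solution(room, viruses, empty_locs, walls, M, N):
--     max_num_of_safe_zones = 0
--
--     new_wall_candidates = itertools.combinations(empty_locs, 3)
--
--     for new_walls in new_wall_candidates:
--         new_room = copy.deepcopy(room)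
--
--         for i, j in new_walls:
--             new_room[i][j] = 1
--
--         num_of_safe_zones = get_num_of_safe_zones(new_room, viruses)
--
--         if num_of_safe_zones > max_num_of_safe_zones:
--             max_num_of_safe_zones = num_of_safe_zones
--
--     return max_num_of_safe_zones
-- ===== SOURCE B (Python) =====
-- import itertools
--
-- def solution(room, viruses, empty_locs, walls, M, N):
--     best = 0
--     for new_walls in itertools.combinations(empty_locs, 3):
--         grid = [row[:] for row in room]
--         for i, j in new_walls:
--             grid[i][j] = 1
--         # depth-first flood fill with an explicit stack, one cell at a time
--         stack = []
--         for vi, vj in viruses: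
--             stack.extend(((vi + 1, vj), (vi - 1, vj), (vi, vj + 1), (vi, vj - 1)))
--         while stack:
--             i, j = stack.pop()
--             if 0 <= i < len(grid) and 0 <= j < len(grid[0]) and grid[i][j] == 0:
--                 grid[i][j] = 2
--                 stack.extend(((i + 1, j), (i - 1, j), (i, j + 1), (i, j - 1)))
--         best = max(best, sum(row.count(0) for row in grid))
--     return best
-- ===== Notes on version B (the rewrite author's own statement) =====
-- stated objective: alternative
-- what changed: The level-by-level frontier-list BFS spread (rebuild a next_visits list per wave) is replaced by a depth-first flood fill with a single explicit stack that pops one cell, infects it and pushes its four neighbours; the zero count becomes a per-row count sum and the running maximum uses max().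
-- outside the precondition, e.g. on solution([[0, 0], [0]], [], [(0, 0), (0, 1), (1, 0)], [], 0, 0): A returns 0, B returns 0
import Mathlib
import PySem

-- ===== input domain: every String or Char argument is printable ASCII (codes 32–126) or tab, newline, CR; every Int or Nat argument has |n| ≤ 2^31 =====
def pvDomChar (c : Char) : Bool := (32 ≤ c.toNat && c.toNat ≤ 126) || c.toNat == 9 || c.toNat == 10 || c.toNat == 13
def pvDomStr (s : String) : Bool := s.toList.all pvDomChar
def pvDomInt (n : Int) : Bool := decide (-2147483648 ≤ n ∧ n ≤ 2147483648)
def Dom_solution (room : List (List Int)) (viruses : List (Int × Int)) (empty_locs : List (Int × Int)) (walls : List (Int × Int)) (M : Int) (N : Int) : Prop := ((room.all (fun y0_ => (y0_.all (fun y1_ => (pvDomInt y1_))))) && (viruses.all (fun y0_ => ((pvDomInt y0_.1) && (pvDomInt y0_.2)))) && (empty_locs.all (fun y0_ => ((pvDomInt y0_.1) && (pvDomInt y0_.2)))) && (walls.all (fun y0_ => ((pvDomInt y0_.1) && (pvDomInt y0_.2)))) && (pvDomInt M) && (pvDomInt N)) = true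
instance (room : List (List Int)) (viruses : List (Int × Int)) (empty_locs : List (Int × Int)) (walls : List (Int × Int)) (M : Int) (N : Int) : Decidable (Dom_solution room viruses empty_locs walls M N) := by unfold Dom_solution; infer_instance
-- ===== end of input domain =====

-- B replaces the wave-by-wave frontier BFS virus spread with a depth-first flood fill
-- driven by one explicit stack (pop a cell, infect, push its four neighbours); same value.


-- ===== PORT A =====
-- shared grid primitives (both Pythons index and assign cells the same way)
-- `room[i][j] = v` (Python indexing incl. negative wraparound; out-of-range raises in
-- Python and is excluded by Pre_, here toNat-clamped)
def pvPut (g : List (List Int)) (i j v : Int) : List (List Int) :=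
  let i' := (if i < 0 then i + (g.length : Int) else i).toNat
  let row := g.getD i' []
  let j' := (if j < 0 then j + (row.length : Int) else j).toNat
  g.set i' (row.set j' v)

-- A's is_ok: bounds against len(room) and len(room[0]), then room[i][j] == 0.
-- The read uses default 1 where Python's room[i][j] would raise IndexError on a ragged
-- row (outside Pre_); exact on Pre_ inputs.
def pvIsOk (g : List (List Int)) (p : Int × Int) : Bool :=
  if p.1 < 0 ∨ (g.length : Int) ≤ p.1 then false
  else if p.2 < 0 ∨ ((g.headD []).length : Int) ≤ p.2 then false
  else if (g.getD p.1.toNat []).getD p.2.toNat 1 ≠ 0 then false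
  else true

def pvDeltas : List (Int × Int) := [(0, 1), (1, 0), (-1, 0), (0, -1)]

-- itertools.combinations(xs, 2) and (xs, 3), lexicographic by position
def pvCombos2 {α : Type} : List α → List (α × α)
  | [] => []
  | x :: rest => (rest.map fun y => (x, y)) ++ pvCombos2 rest

def pvCombos3 {α : Type} : List α → List (α × α × α)
  | [] => []
  | x :: rest => ((pvCombos2 rest).map fun yz => (x, yz.1, yz.2)) ++ pvCombos3 rest

-- number of 0 cells (termination measure for both loops)
def pvZeros (g : List (List Int)) : Nat := (g.map fun r => r.count 0).sum

-- one delta of A's inner `for di, dj in deltas`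
def pvStep (pos : Int × Int) (st : List (List Int) × List (Int × Int)) (d : Int × Int) :
    List (List Int) × List (Int × Int) :=
  if pvIsOk st.1 (pos.1 + d.1, pos.2 + d.2) then
    (pvPut st.1 (pos.1 + d.1) (pos.2 + d.2) 2, st.2 ++ [(pos.1 + d.1, pos.2 + d.2)])
  else st

-- one pos of A's `for pos in to_visits`
def pvVisit (st : List (List Int) × List (Int × Int)) (pos : Int × Int) :
    List (List Int) × List (Int × Int) :=
  pvDeltas.foldl (pvStep pos) st

-- one iteration of A's while loop: returns (room, next_visits)
def pvRound (g : List (List Int)) (F : List (Int × Int)) :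
    List (List Int) × List (Int × Int) :=
  F.foldl pvVisit (g, [])

lemma pv_getD_set_zero (l : List Int) (j : Nat) (hj : l.getD j 1 = 0) :
    (l.set j 2).count 0 < l.count 0 := by
  induction l generalizing j with
  | nil => simp [List.getD] at hj
  | cons a tl ih =>
    cases j with
    | zero =>
      simp [List.getD] at hj
      subst hj
      simp
    | succ j =>
      simp only [List.getD_cons_succ] at hj
      have := ih j hj
      simp only [List.set_cons_succ, List.count_cons]
      omega

lemma pv_zeros_set (g : List (List Int)) (i : Nat) (r : List Int) (hi : i < g.length) :
    pvZeros (g.set i r) + (g.getD i []).count 0 = pvZeros g + r.count 0 := by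
  induction g generalizing i with
  | nil => simp at hi
  | cons a tl ih =>
    cases i with
    | zero => simp [pvZeros, List.getD]; ring
    | succ i =>
      simp only [List.length_cons, Nat.add_lt_add_iff_right] at hi
      have := ih i hi
      simp only [List.set_cons_succ, List.getD_cons_succ, pvZeros, List.map_cons, List.sum_cons] at *
      omega

lemma pv_put_zeros (g : List (List Int)) (p : Int × Int) (h : pvIsOk g p = true) :
    pvZeros (pvPut g p.1 p.2 2) < pvZeros g := by
  unfold pvIsOk at h
  split_ifs at h with h1 h2 h3
  push_neg at h1 h2
  rw [not_ne_iff] at h3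
  unfold pvPut
  have hni : ¬ p.1 < 0 := not_lt.2 h1.1
  have hnj : ¬ p.2 < 0 := not_lt.2 h2.1
  simp only [if_neg hni, if_neg hnj]
  have hi : p.1.toNat < g.length := by omega
  have hz := pv_zeros_set g p.1.toNat ((g.getD p.1.toNat []).set p.2.toNat 2) hi
  have hc := pv_getD_set_zero (g.getD p.1.toNat []) p.2.toNat h3
  omega

lemma pv_step_le (pos : Int × Int) (st : List (List Int) × List (Int × Int)) (d : Int × Int) :
    pvZeros (pvStep pos st d).1 + (pvStep pos st d).2.length ≤ pvZeros st.1 + st.2.length := by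
  unfold pvStep
  split_ifs with h
  · have := pv_put_zeros st.1 (pos.1 + d.1, pos.2 + d.2) h
    simp only [List.length_append, List.length_cons, List.length_nil] at *
    omega
  · exact le_rfl

lemma pv_folds_le (pos : Int × Int) (ds : List (Int × Int)) (st : List (List Int) × List (Int × Int)) :
    pvZeros (ds.foldl (pvStep pos) st).1 + (ds.foldl (pvStep pos) st).2.length ≤
      pvZeros st.1 + st.2.length := by
  induction ds generalizing st with
  | nil => exact le_rfl
  | cons d ds ih =>
    simp only [List.foldl_cons]
    exact le_trans (ih (pvStep pos st d)) (pv_step_le pos st d)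

lemma pv_round_le (F : List (Int × Int)) (st : List (List Int) × List (Int × Int)) :
    pvZeros (F.foldl pvVisit st).1 + (F.foldl pvVisit st).2.length ≤
      pvZeros st.1 + st.2.length := by
  induction F generalizing st with
  | nil => exact le_rfl
  | cons q F ih =>
    simp only [List.foldl_cons]
    exact le_trans (ih (pvVisit st q)) (pv_folds_le q pvDeltas st)

-- A's while loop over frontiers
def pvBfs : List (List Int) → List (Int × Int) → List (List Int)
  | g, [] => g
  | g, p :: F =>
    let r := pvRound g (p :: F)
    pvBfs r.1 r.2
termination_by g F => 2 * pvZeros g + (if F.isEmpty then 0 else 1)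
decreasing_by
  have h1 : pvZeros (pvRound g (p :: F)).1 + (pvRound g (p :: F)).2.length ≤
      pvZeros g + ([] : List (Int × Int)).length := pv_round_le (p :: F) (g, [])
  simp only [List.length_nil, Nat.add_zero] at h1
  rcases hn : (pvRound g (p :: F)).2 with _ | ⟨x, xs⟩ <;>
    rw [hn] at h1 <;> simp at h1 ⊢ <;> omega

def solution (room : List (List Int)) (viruses : List (Int × Int)) (empty_locs : List (Int × Int)) (walls : List (Int × Int)) (M : Int) (N : Int) : Int :=
  (pvCombos3 empty_locs).foldl (fun best t =>
    let g1 := [t.1, t.2.1, t.2.2].foldl (fun g q => pvPut g q.1 q.2 1) room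
    let g2 := pvBfs g1 viruses
    let n := g2.foldl (fun acc r => r.foldl (fun a v => if v = 0 then a + 1 else a) acc) (0 : Int)
    if n > best then n else best) 0

-- ===== PORT B =====
-- B's bounds-and-zero test `0 <= i < len(grid) and 0 <= j < len(grid[0]) and grid[i][j] == 0`
-- (same default-1 convention for the ragged IndexError case outside Pre_)
def pvCanInfect (g : List (List Int)) (i j : Int) : Bool :=
  decide (0 ≤ i) && decide (i < (g.length : Int)) && decide (0 ≤ j) &&
    decide (j < ((g.headD []).length : Int)) && ((g.getD i.toNat []).getD j.toNat 1 == 0)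

lemma pv_canInfect_iff (g : List (List Int)) (i j : Int) :
    pvCanInfect g i j = pvIsOk g (i, j) := by
  unfold pvCanInfect pvIsOk
  by_cases h1 : i < 0 <;> by_cases h2 : (g.length : Int) ≤ i <;>
    by_cases h3 : j < 0 <;> by_cases h4 : ((g.headD []).length : Int) ≤ j <;>
    by_cases h5 : (g.getD i.toNat []).getD j.toNat 1 = 0 <;>
    simp_all <;> omega

-- initial stack: the four neighbours of every virus (top of the Python stack = head here)
def pvStack0 (viruses : List (Int × Int)) : List (Int × Int) :=
  (viruses.foldl
    (fun s v => s ++ [(v.1 + 1, v.2), (v.1 - 1, v.2), (v.1, v.2 + 1), (v.1, v.2 - 1)])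
    ([] : List (Int × Int))).reverse

-- B's while loop: pop one candidate cell, infect it, push its neighbours
-- (stack represented top-first: Python's pop()/extend order is the head order below)
def pvDfs : List (List Int) → List (Int × Int) → List (List Int)
  | g, [] => g
  | g, p :: rest =>
    if h : pvCanInfect g p.1 p.2 then
      pvDfs (pvPut g p.1 p.2 2)
        ([(p.1, p.2 - 1), (p.1, p.2 + 1), (p.1 - 1, p.2), (p.1 + 1, p.2)] ++ rest)
    else pvDfs g rest
termination_by g st => 5 * pvZeros g + st.length
decreasing_by
  all_goals first
  | (simp only [List.length_cons]; omega)
  | (have h2 : pvZeros (pvPut g p.1 p.2 2) < pvZeros g := by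
       apply pv_put_zeros g (p.1, p.2); rwa [← pv_canInfect_iff]
     simp
     omega)

def solution_alt (room : List (List Int)) (viruses : List (Int × Int)) (empty_locs : List (Int × Int)) (walls : List (Int × Int)) (M : Int) (N : Int) : Int :=
  (pvCombos3 empty_locs).foldl (fun best t =>
    let g1 := [t.1, t.2.1, t.2.2].foldl (fun g q => pvPut g q.1 q.2 1) room
    let g2 := pvDfs g1 (pvStack0 viruses)
    max best (((g2.map fun r => r.count 0).sum : Nat) : Int)) 0

-- ===== PRECONDITION & SPEC =====
-- Pre_ excludes, when at least 3 candidate wall locations exist (otherwise A places no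
-- walls and just returns 0), ragged rooms whose first row is not the shortest and wall
-- coordinates outside Python's index range: there A raises IndexError on most inputs,
-- and where it happens to return, its value rests on the accidental len(room[0]) column
-- bound of is_ok, which the ports do not model.
def Pre_solution (room : List (List Int)) (viruses : List (Int × Int)) (empty_locs : List (Int × Int)) (walls : List (Int × Int)) (M : Int) (N : Int) : Prop :=
  empty_locs.length < 3 ∨
    ((∀ row ∈ room, (room.headD []).length ≤ row.length) ∧
     ∀ q ∈ empty_locs,
       (-(room.length : Int) ≤ q.1 ∧ q.1 < (room.length : Int)) ∧
       (-(((room.getD (if q.1 < 0 then q.1 + (room.length : Int) else q.1).toNat []).length : Int)) ≤ q.2 ∧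
        q.2 < ((room.getD (if q.1 < 0 then q.1 + (room.length : Int) else q.1).toNat []).length : Int)))

instance (room : List (List Int)) (viruses : List (Int × Int)) (empty_locs : List (Int × Int)) (walls : List (Int × Int)) (M : Int) (N : Int) : Decidable (Pre_solution room viruses empty_locs walls M N) := by unfold Pre_solution; infer_instance

def pvWitness_solution : List (List Int) × (List (Int × Int)) × (List (Int × Int)) × (List (Int × Int)) × Int × Int :=
  ([[0, 0], [0, 2]], [(1, 1)], [(0, 0), (0, 1), (1, 0)], [], 2, 2)

def Spec_solution (room : List (List Int)) (viruses : List (Int × Int)) (empty_locs : List (Int × Int)) (walls : List (Int × Int)) (M : Int) (N : Int) (out : Int) : Prop := out = solution_alt room viruses empty_locs walls M N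
instance (room : List (List Int)) (viruses : List (Int × Int)) (empty_locs : List (Int × Int)) (walls : List (Int × Int)) (M : Int) (N : Int) (out : Int) : Decidable (Spec_solution room viruses empty_locs walls M N out) := by unfold Spec_solution; infer_instance

-- ===== CLAIM (what is proved, stated in full; the proofs are below) =====
def Claim_equal_solution : Prop := ∀ (room : List (List Int)) (viruses : List (Int × Int)) (empty_locs : List (Int × Int)) (walls : List (Int × Int)) (M : Int) (N : Int), Dom_solution room viruses empty_locs walls M N → Pre_solution room viruses empty_locs walls M N → Spec_solution room viruses empty_locs walls M N (solution room viruses empty_locs walls M N)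

-- ===== LEMMAS AND PROOFS =====

-- the four grid neighbours of a cell, and closure of a seed set through 0-cells
def pvNbrs (q : Int × Int) : List (Int × Int) :=
  [(q.1 + 1, q.2), (q.1 - 1, q.2), (q.1, q.2 + 1), (q.1, q.2 - 1)]

inductive pvCl (g : List (List Int)) (B : Int × Int → Prop) : Int × Int → Prop
  | base (p : Int × Int) : B p → pvIsOk g p = true → pvCl g B p
  | step (q p : Int × Int) : pvCl g B q → p ∈ pvNbrs q → pvIsOk g p = true → pvCl g B p

noncomputable def pvPaint (S : Int × Int → Prop) (g : List (List Int)) : List (List Int) :=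
  g.mapIdx fun i row => row.mapIdx fun j v =>
    @ite _ (S ((i : Int), (j : Int))) (Classical.propDecidable _) 2 v

theorem pv_paint_length (S : Int × Int → Prop) (g : List (List Int)) :
    (pvPaint S g).length = g.length := by
  simp [pvPaint]

theorem pv_mapIdx_getD (row : List Int) (f : Nat → Int → Int) (j : Nat) :
    (row.mapIdx f).getD j 1 = if h : j < row.length then f j (row[j]'h) else 1 := by
  rcases Nat.lt_or_ge j row.length with hj | hj
  · have h1 : j < (row.mapIdx f).length := by simpa using hj
    rw [List.getD_eq_getElem _ _ h1, dif_pos hj]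
    simp
  · have h1 : (row.mapIdx f).length ≤ j := by simpa using hj
    rw [List.getD_eq_default _ _ h1, dif_neg (not_lt.2 hj)]

theorem pv_paint_getD (S : Int × Int → Prop) (g : List (List Int)) (i : Nat) :
    (pvPaint S g).getD i [] =
      (g.getD i []).mapIdx fun j v =>
        @ite _ (S ((i : Int), (j : Int))) (Classical.propDecidable _) 2 v := by
  rcases Nat.lt_or_ge i g.length with hi | hi
  · have h1 : i < (pvPaint S g).length := by rw [pv_paint_length]; exact hi
    rw [List.getD_eq_getElem _ _ h1, List.getD_eq_getElem _ _ hi]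
    simp [pvPaint]
  · have h1 : (pvPaint S g).length ≤ i := by rw [pv_paint_length]; exact hi
    rw [List.getD_eq_default _ _ h1, List.getD_eq_default _ _ hi]
    simp

theorem pv_paint_congr (S T : Int × Int → Prop) (g : List (List Int))
    (h : ∀ p, S p ↔ T p) : pvPaint S g = pvPaint T g := by
  apply List.ext_getElem (by simp [pv_paint_length])
  intro i h1 h2
  simp only [pvPaint, List.getElem_mapIdx]
  apply List.ext_getElem (by simp)
  intro j h3 h4
  simp only [List.getElem_mapIdx]
  by_cases hs : S ((i : Int), (j : Int))
  · rw [if_pos hs, if_pos ((h _).mp hs)]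
  · rw [if_neg hs, if_neg (fun ht => hs ((h _).mpr ht))]

theorem pv_paint_false (S : Int × Int → Prop) (g : List (List Int))
    (h : ∀ p, ¬ S p) : pvPaint S g = g := by
  apply List.ext_getElem (by simp [pv_paint_length])
  intro i h1 h2
  simp only [pvPaint, List.getElem_mapIdx]
  apply List.ext_getElem (by simp)
  intro j h3 h4
  simp [List.getElem_mapIdx, h]

theorem pv_paint_paint (S T : Int × Int → Prop) (g : List (List Int)) :
    pvPaint S (pvPaint T g) = pvPaint (fun p => S p ∨ T p) g := by
  apply List.ext_getElem (by simp [pv_paint_length])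
  intro i h1 h2
  simp only [pvPaint, List.getElem_mapIdx]
  apply List.ext_getElem (by simp)
  intro j h3 h4
  simp only [List.getElem_mapIdx]
  by_cases hs : S ((i : Int), (j : Int)) <;> by_cases ht : T ((i : Int), (j : Int)) <;>
    simp [hs, ht]

theorem pv_ok_paint (S : Int × Int → Prop) (g : List (List Int)) (p : Int × Int) :
    pvIsOk (pvPaint S g) p = true ↔ pvIsOk g p = true ∧ ¬ S p := by
  have hL : (pvPaint S g).length = g.length := pv_paint_length S g
  have hH : ((pvPaint S g).headD []).length = (g.headD []).length := by
    cases g <;> simp [pvPaint, List.mapIdx_cons]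
  unfold pvIsOk
  rw [hL, hH]
  by_cases h1 : p.1 < 0 ∨ ((g.length : Nat) : Int) ≤ p.1
  · simp [h1]
  · by_cases h2 : p.2 < 0 ∨ (((g.headD []).length : Nat) : Int) ≤ p.2
    · rw [if_neg h1, if_neg h1, if_pos h2, if_pos h2]
      simp
    · simp only [if_neg h1, if_neg h2]
      push_neg at h1 h2
      obtain ⟨hi0, hiL⟩ := h1
      obtain ⟨hj0, hjH⟩ := h2
      rw [pv_paint_getD]
      rcases Nat.lt_or_ge p.2.toNat (g.getD p.1.toNat []).length with hj | hj
      · rw [pv_mapIdx_getD _ _ _, dif_pos hj]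
        have hp : (((p.1.toNat : Nat) : Int), ((p.2.toNat : Nat) : Int)) = p := by
          obtain ⟨a, b⟩ := p
          simp only [Prod.mk.injEq]
          constructor <;> omega
        by_cases hS : S p
        · have hSp : S (((p.1.toNat : Nat) : Int), ((p.2.toNat : Nat) : Int)) := by
            rw [hp]; exact hS
          rw [if_pos hSp]
          simp [hS]
        · have hSp : ¬ S (((p.1.toNat : Nat) : Int), ((p.2.toNat : Nat) : Int)) := by
            rw [hp]; exact hS
          rw [if_neg hSp]
          rw [List.getD_eq_getElem _ _ hj]
          simp [hS]
      · rw [pv_mapIdx_getD _ _ _, dif_neg (not_lt.2 hj), List.getD_eq_default _ _ hj]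
        simp

theorem pv_put_eq_paint (g : List (List Int)) (p : Int × Int) (h : pvIsOk g p = true) :
    pvPut g p.1 p.2 2 = pvPaint (fun x => x = p) g := by
  unfold pvIsOk at h
  split_ifs at h with h1 h2 h3
  push_neg at h1 h2
  rw [not_ne_iff] at h3
  have hj : p.2.toNat < (g.getD p.1.toNat []).length := by
    by_contra hc
    rw [List.getD_eq_default _ _ (le_of_not_gt hc)] at h3
    norm_num at h3
  simp only [pvPut, if_neg (not_lt.2 h1.1), if_neg (not_lt.2 h2.1)]
  obtain ⟨hi0, hiL⟩ := h1
  obtain ⟨hj0, hjH⟩ := h2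
  have hiN : p.1.toNat < g.length := by omega
  apply List.ext_getElem
  · simp [pv_paint_length]
  intro i hi1 hi2
  rw [pv_paint_length] at hi2
  simp only [List.getElem_set, pvPaint, List.getElem_mapIdx]
  have hgg : g.getD p.1.toNat [] = g[p.1.toNat]'hiN := List.getD_eq_getElem _ _ hiN
  by_cases hii : p.1.toNat = i
  · subst hii
    rw [if_pos rfl]
    apply List.ext_getElem
    · simp only [List.length_set, List.length_mapIdx]
      rw [hgg]
    intro j hj1 hj2
    simp only [List.getElem_set, List.getElem_mapIdx]
    by_cases hjj : p.2.toNat = j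
    · subst hjj
      rw [if_pos rfl, if_pos (by
        obtain ⟨a, b⟩ := p
        simp only [Prod.mk.injEq]
        constructor <;> simp <;> omega)]
    · rw [if_neg hjj, if_neg (by
        intro hc
        apply hjj
        have h2' := congrArg Prod.snd hc
        simp at h2'
        omega)]
      simp only [hgg]
  · rw [if_neg hii]
    apply List.ext_getElem
    · simp
    intro j hj1 hj2
    simp only [List.getElem_mapIdx]
    rw [if_neg (by
      intro hc
      apply hii
      have h1' := congrArg Prod.fst hc
      simp at h1'
      omega)]

theorem pv_cl_congr (g : List (List Int)) (B B' : Int × Int → Prop)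
    (h : ∀ p, B p ↔ B' p) (x : Int × Int) : pvCl g B x ↔ pvCl g B' x := by
  constructor <;> intro hc
  · induction hc with
    | base p hB hok => exact pvCl.base p ((h p).1 hB) hok
    | step q p hq hadj hok ih => exact pvCl.step q p ih hadj hok
  · induction hc with
    | base p hB hok => exact pvCl.base p ((h p).2 hB) hok
    | step q p hq hadj hok ih => exact pvCl.step q p ih hadj hok

theorem pv_cl_false (g : List (List Int)) (B : Int × Int → Prop)
    (h : ∀ p, ¬ B p) (x : Int × Int) : ¬ pvCl g B x := by
  intro hc
  induction hc with
  | base p hB hok => exact h p hB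
  | step q p hq hadj hok ih => exact ih

-- dropping an unusable seed
theorem pv_cl_drop (g : List (List Int)) (B : Int × Int → Prop) (p : Int × Int)
    (hp : ¬ pvIsOk g p = true) (x : Int × Int) :
    pvCl g (fun y => y = p ∨ B y) x ↔ pvCl g B x := by
  constructor <;> intro hc
  · induction hc with
    | base y hB hok =>
      rcases hB with rfl | hB
      · exact absurd hok hp
      · exact pvCl.base y hB hok
    | step q y hq hadj hok ih => exact pvCl.step q y ih hadj hok
  · induction hc with
    | base y hB hok => exact pvCl.base y (Or.inr hB) hok
    | step q y hq hadj hok ih => exact pvCl.step q y ih hadj hok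

-- marking one seed cell: closure before = the cell plus closure after, seeds shifted
theorem pv_cl_mark (g : List (List Int)) (B : Int × Int → Prop) (p : Int × Int)
    (hp : pvIsOk g p = true) (x : Int × Int) :
    pvCl g (fun y => y = p ∨ B y) x ↔
      x = p ∨ pvCl (pvPaint (fun y => y = p) g) (fun y => y ∈ pvNbrs p ∨ B y) x := by
  constructor
  · intro hc
    induction hc with
    | base y hB hok =>
      by_cases hyp : y = p
      · exact Or.inl hyp
      · rcases hB with rfl | hB
        · exact Or.inl rfl
        · exact Or.inr (pvCl.base y (Or.inr hB) ((pv_ok_paint (fun y => y = p) g y).2 ⟨hok, hyp⟩))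
    | step q y hq hadj hok ih =>
      by_cases hyp : y = p
      · exact Or.inl hyp
      · refine Or.inr ?_
        have hok' := (pv_ok_paint (fun y => y = p) g y).2 ⟨hok, hyp⟩
        rcases ih with rfl | ihq
        · exact pvCl.base y (Or.inl hadj) hok'
        · exact pvCl.step q y ihq hadj hok'
  · intro hc
    rcases hc with rfl | hc
    · exact pvCl.base x (Or.inl rfl) hp
    · induction hc with
      | base y hB hok =>
        have hok' := ((pv_ok_paint (fun y => y = p) g y).1 hok).1
        rcases hB with hB | hB
        · exact pvCl.step p y (pvCl.base p (Or.inl rfl) hp) hB hok'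
        · exact pvCl.base y (Or.inr hB) hok'
      | step q y hq hadj hok ih =>
        exact pvCl.step q y ih hadj ((pv_ok_paint (fun y => y = p) g y).1 hok).1

-- seeds of A's BFS: neighbours of the frontier
def pvNB (F : List (Int × Int)) (p : Int × Int) : Prop := ∃ q ∈ F, p ∈ pvNbrs q

theorem pv_mem_nbrs_deltas (pos x : Int × Int) :
    (∃ d ∈ pvDeltas, x = (pos.1 + d.1, pos.2 + d.2)) ↔ x ∈ pvNbrs pos := by
  simp [pvDeltas, pvNbrs]
  tauto

-- one delta of one frontier cell
theorem pv_step_char (g : List (List Int)) (pos d : Int × Int)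
    (st : List (List Int) × List (Int × Int))
    (hg : st.1 = pvPaint (fun y => y ∈ st.2) g) :
    (pvStep pos st d).1 = pvPaint (fun y => y ∈ (pvStep pos st d).2) g ∧
      ∀ x, x ∈ (pvStep pos st d).2 ↔
        x ∈ st.2 ∨ (pvIsOk g x = true ∧ x = (pos.1 + d.1, pos.2 + d.2)) := by
  unfold pvStep
  split_ifs with h
  · dsimp only
    rw [hg] at h
    have hok := (pv_ok_paint (fun y => y ∈ st.2) g _).1 h
    constructor
    · have h1 : pvPut st.1 (pos.1 + d.1) (pos.2 + d.2) 2 =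
          pvPaint (fun y => y = (pos.1 + d.1, pos.2 + d.2)) st.1 := by
        rw [hg]
        exact pv_put_eq_paint _ (pos.1 + d.1, pos.2 + d.2) h
      rw [h1, hg, pv_paint_paint]
      apply pv_paint_congr
      intro y
      simp [or_comm]
    · intro x
      simp only [List.mem_append, List.mem_singleton]
      constructor
      · rintro (hx | rfl)
        · exact Or.inl hx
        · exact Or.inr ⟨hok.1, rfl⟩
      · rintro (hx | ⟨_, rfl⟩)
        · exact Or.inl hx
        · exact Or.inr rfl
  · refine ⟨hg, fun x => ?_⟩
    rw [hg] at h
    rw [pv_ok_paint (fun y => y ∈ st.2) g] at h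
    push_neg at h
    constructor
    · exact Or.inl
    · rintro (hx | ⟨hokx, rfl⟩)
      · exact hx
      · exact h hokx

-- all four deltas of one frontier cell
theorem pv_steps_char (g : List (List Int)) (pos : Int × Int) (ds : List (Int × Int))
    (st : List (List Int) × List (Int × Int))
    (hg : st.1 = pvPaint (fun y => y ∈ st.2) g) :
    (ds.foldl (pvStep pos) st).1 =
        pvPaint (fun y => y ∈ (ds.foldl (pvStep pos) st).2) g ∧
      ∀ x, x ∈ (ds.foldl (pvStep pos) st).2 ↔
        x ∈ st.2 ∨ (pvIsOk g x = true ∧ ∃ d ∈ ds, x = (pos.1 + d.1, pos.2 + d.2)) := by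
  induction ds generalizing st with
  | nil => exact ⟨hg, by simp⟩
  | cons d ds ih =>
    simp only [List.foldl_cons]
    obtain ⟨hg1, hm1⟩ := pv_step_char g pos d st hg
    obtain ⟨hg2, hm2⟩ := ih (pvStep pos st d) hg1
    refine ⟨hg2, fun x => ?_⟩
    rw [hm2 x]
    simp only [List.mem_cons]
    constructor
    · rintro (hx | ⟨hokx, d', hd', rfl⟩)
      · rcases (hm1 x).1 hx with hx' | ⟨hokx, rfl⟩
        · exact Or.inl hx'
        · exact Or.inr ⟨hokx, d, Or.inl rfl, rfl⟩
      · exact Or.inr ⟨hokx, d', Or.inr hd', rfl⟩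
    · rintro (hx | ⟨hokx, d', hd', hx2⟩)
      · exact Or.inl ((hm1 x).2 (Or.inl hx))
      · rcases hd' with rfl | hd'
        · exact Or.inl ((hm1 x).2 (Or.inr ⟨hokx, hx2⟩))
        · exact Or.inr ⟨hokx, d', hd', hx2⟩

-- the whole frontier
theorem pv_visits_char (g : List (List Int)) (F : List (Int × Int))
    (st : List (List Int) × List (Int × Int))
    (hg : st.1 = pvPaint (fun y => y ∈ st.2) g) :
    (F.foldl pvVisit st).1 = pvPaint (fun y => y ∈ (F.foldl pvVisit st).2) g ∧
      ∀ x, x ∈ (F.foldl pvVisit st).2 ↔ x ∈ st.2 ∨ (pvIsOk g x = true ∧ pvNB F x) := by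
  induction F generalizing st with
  | nil => exact ⟨hg, by simp [pvNB]⟩
  | cons q F ih =>
    simp only [List.foldl_cons]
    obtain ⟨hg1, hm1⟩ := pv_steps_char g q pvDeltas st hg
    obtain ⟨hg2, hm2⟩ := ih (pvVisit st q) hg1
    refine ⟨hg2, fun x => ?_⟩
    rw [hm2 x]
    have hm1' : ∀ x, x ∈ (pvVisit st q).2 ↔
        x ∈ st.2 ∨ (pvIsOk g x = true ∧ x ∈ pvNbrs q) := by
      intro y
      rw [show pvVisit st q = pvDeltas.foldl (pvStep q) st from rfl, hm1 y]
      constructor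
      · rintro (hy | ⟨hok, hy⟩)
        · exact Or.inl hy
        · exact Or.inr ⟨hok, (pv_mem_nbrs_deltas q y).1 hy⟩
      · rintro (hy | ⟨hok, hy⟩)
        · exact Or.inl hy
        · exact Or.inr ⟨hok, (pv_mem_nbrs_deltas q y).2 hy⟩
    rw [hm1' x]
    simp only [pvNB, List.mem_cons]
    constructor
    · rintro ((hx | ⟨hok, hx⟩) | ⟨hok, q', hq', hx⟩)
      · exact Or.inl hx
      · exact Or.inr ⟨hok, q, Or.inl rfl, hx⟩
      · exact Or.inr ⟨hok, q', Or.inr hq', hx⟩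
    · rintro (hx | ⟨hok, q', (rfl | hq'), hx⟩)
      · exact Or.inl (Or.inl hx)
      · exact Or.inl (Or.inr ⟨hok, hx⟩)
      · exact Or.inr ⟨hok, q', hq', hx⟩

-- round characterisation: the wave marks exactly the usable neighbours of the frontier
theorem pv_round_char (g : List (List Int)) (F : List (Int × Int)) :
    (pvRound g F).1 = pvPaint (fun x => x ∈ (pvRound g F).2) g ∧
      ∀ x, x ∈ (pvRound g F).2 ↔ (pvIsOk g x = true ∧ pvNB F x) := by
  obtain ⟨h1, h2⟩ := pv_visits_char g F (g, []) (by
    exact (pv_paint_false _ g (by simp)).symm)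
  refine ⟨h1, fun x => ?_⟩
  rw [show pvRound g F = F.foldl pvVisit (g, []) from rfl, h2 x]
  simp

-- absorbing a whole wave into the closure
theorem pv_cl_round (g : List (List Int)) (F : List (Int × Int)) (N : List (Int × Int))
    (hN : ∀ x, x ∈ N ↔ (pvIsOk g x = true ∧ pvNB F x)) (x : Int × Int) :
    (pvCl (pvPaint (fun y => y ∈ N) g) (pvNB N) x ∨ x ∈ N) ↔ pvCl g (pvNB F) x := by
  constructor
  · rintro (hc | hxN)
    · induction hc with
      | base y hB hok =>
        obtain ⟨q, hqN, hadj⟩ := hB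
        obtain ⟨hokq, hNBq⟩ := (hN q).1 hqN
        have hoky := ((pv_ok_paint (fun y => y ∈ N) g y).1 hok).1
        exact pvCl.step q y (pvCl.base q hNBq hokq) hadj hoky
      | step q y hq hadj hok ih =>
        exact pvCl.step q y ih hadj ((pv_ok_paint (fun y => y ∈ N) g y).1 hok).1
    · obtain ⟨hokx, hNBx⟩ := (hN x).1 hxN
      exact pvCl.base x hNBx hokx
  · intro hc
    induction hc with
    | base y hB hok => exact Or.inr ((hN y).2 ⟨hok, hB⟩)
    | step q y hq hadj hok ih =>
      by_cases hyN : y ∈ N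
      · exact Or.inr hyN
      · have hok' := (pv_ok_paint (fun y => y ∈ N) g y).2 ⟨hok, hyN⟩
        rcases ih with hq' | hqN
        · exact Or.inl (pvCl.step q y hq' hadj hok')
        · exact Or.inl (pvCl.base y ⟨q, hqN, hadj⟩ hok')

theorem pv_bfs_paint (g : List (List Int)) (F : List (Int × Int)) :
    pvBfs g F = pvPaint (pvCl g (pvNB F)) g := by
  induction g, F using pvBfs.induct with
  | case1 g =>
    rw [pvBfs]
    exact (pv_paint_false _ g (fun p => pv_cl_false g _ (by simp [pvNB]) p)).symm
  | case2 g p F r ih =>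
    rw [pvBfs]
    have hr : r = pvRound g (p :: F) := rfl
    rw [show (pvRound g (p :: F)).1 = r.1 from rfl, show (pvRound g (p :: F)).2 = r.2 from rfl] at *
    rw [ih]
    obtain ⟨h1, h2⟩ := pv_round_char g (p :: F)
    rw [← hr] at h1 h2
    calc pvPaint (pvCl r.1 (pvNB r.2)) r.1
        = pvPaint (pvCl (pvPaint (fun y => y ∈ r.2) g) (pvNB r.2))
            (pvPaint (fun y => y ∈ r.2) g) := by rw [← h1]
      _ = pvPaint (fun x =>
            pvCl (pvPaint (fun y => y ∈ r.2) g) (pvNB r.2) x ∨ x ∈ r.2) g := pv_paint_paint _ _ g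
      _ = pvPaint (pvCl g (pvNB (p :: F))) g :=
          pv_paint_congr _ _ g (pv_cl_round g (p :: F) r.2 h2)

theorem pv_nbrsrev_mem (p x : Int × Int) :
    x ∈ [(p.1, p.2 - 1), (p.1, p.2 + 1), (p.1 - 1, p.2), (p.1 + 1, p.2)] ↔ x ∈ pvNbrs p := by
  simp [pvNbrs]
  tauto

theorem pv_dfs_paint (g : List (List Int)) (st : List (Int × Int)) :
    pvDfs g st = pvPaint (pvCl g (fun y => y ∈ st)) g := by
  induction g, st using pvDfs.induct with
  | case1 g =>
    rw [pvDfs]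
    exact (pv_paint_false _ g (fun p => pv_cl_false g _ (by simp) p)).symm
  | case2 g p rest h ih =>
    rw [pvDfs, dif_pos h]
    rw [pv_canInfect_iff] at h
    rw [ih]
    have hput : pvPut g p.1 p.2 2 = pvPaint (fun x => x = p) g :=
      pv_put_eq_paint g p h
    rw [hput, pv_paint_paint]
    apply pv_paint_congr
    intro x
    have hmark := pv_cl_mark g (fun y => y ∈ rest) p h x
    have e1 : ∀ y, pvCl g (fun z => z ∈ p :: rest) y ↔ pvCl g (fun z => z = p ∨ z ∈ rest) y :=
      fun y => pv_cl_congr g (fun z => z ∈ p :: rest) (fun z => z = p ∨ z ∈ rest)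
        (fun z => by simp) y
    have e2 : ∀ y, pvCl (pvPaint (fun x => x = p) g)
          (fun z => z ∈ [(p.1, p.2 - 1), (p.1, p.2 + 1), (p.1 - 1, p.2), (p.1 + 1, p.2)] ++ rest) y ↔
        pvCl (pvPaint (fun y => y = p) g) (fun z => z ∈ pvNbrs p ∨ z ∈ rest) y :=
      fun y => pv_cl_congr _ _ _
        (fun z => by simp only [List.mem_append, pv_nbrsrev_mem]) y
    constructor
    · rintro (hc | rfl)
      · exact (e1 x).2 (hmark.2 (Or.inr ((e2 x).1 hc)))
      · exact (e1 x).2 (hmark.2 (Or.inl rfl))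
    · intro hc
      rcases hmark.1 ((e1 x).1 hc) with rfl | hc'
      · exact Or.inr rfl
      · exact Or.inl ((e2 x).2 hc')
  | case3 g p rest h ih =>
    rw [pvDfs, dif_neg h]
    rw [pv_canInfect_iff] at h
    rw [ih]
    apply pv_paint_congr
    intro x
    apply Iff.symm
    calc pvCl g (fun y => y ∈ p :: rest) x
        ↔ pvCl g (fun y => y = p ∨ y ∈ rest) x :=
          pv_cl_congr g _ _ (fun y => by simp) x
      _ ↔ pvCl g (fun y => y ∈ rest) x := pv_cl_drop g _ p h x

theorem pv_stack0_fold (viruses : List (Int × Int)) (acc : List (Int × Int)) (x : Int × Int) :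
    x ∈ viruses.foldl
        (fun s v => s ++ [(v.1 + 1, v.2), (v.1 - 1, v.2), (v.1, v.2 + 1), (v.1, v.2 - 1)]) acc ↔
      x ∈ acc ∨ ∃ q ∈ viruses, x ∈ pvNbrs q := by
  induction viruses generalizing acc with
  | nil => simp
  | cons v vs ih =>
    simp only [List.foldl_cons]
    rw [ih]
    simp only [List.mem_append, List.mem_cons, pvNbrs]
    constructor
    · rintro ((hx | hx) | ⟨q, hq, hx⟩)
      · exact Or.inl hx
      · exact Or.inr ⟨v, Or.inl rfl, by simpa using hx⟩
      · exact Or.inr ⟨q, Or.inr hq, hx⟩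
    · rintro (hx | ⟨q, (rfl | hq), hx⟩)
      · exact Or.inl (Or.inl hx)
      · exact Or.inl (Or.inr (by simpa using hx))
      · exact Or.inr ⟨q, hq, hx⟩

theorem pv_stack0_mem (viruses : List (Int × Int)) (x : Int × Int) :
    x ∈ pvStack0 viruses ↔ pvNB viruses x := by
  unfold pvStack0 pvNB
  rw [List.mem_reverse]
  rw [pv_stack0_fold]
  simp

-- the two flood fills agree
theorem pv_spread_eq (g : List (List Int)) (viruses : List (Int × Int)) :
    pvBfs g viruses = pvDfs g (pvStack0 viruses) := by
  rw [pv_bfs_paint, pv_dfs_paint]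
  exact pv_paint_congr _ _ g
    (fun x => pv_cl_congr g _ _ (fun y => (pv_stack0_mem viruses y).symm) x)

-- A's counting loop equals the per-row count sum
theorem pv_count_eq (g : List (List Int)) (c : Int) :
    g.foldl (fun acc r => r.foldl (fun a v => if v = 0 then a + 1 else a) acc) c =
      c + (((g.map fun r => r.count 0).sum : Nat) : Int) := by
  induction g generalizing c with
  | nil => simp
  | cons r g ih =>
    simp only [List.foldl_cons, List.map_cons, List.sum_cons]
    rw [ih]
    have hrow : ∀ (l : List Int) (a : Int),
        l.foldl (fun a v => if v = 0 then a + 1 else a) a = a + ((l.count 0 : Nat) : Int) := by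
      intro l
      induction l with
      | nil => simp
      | cons v l ihl =>
        intro a
        rw [List.foldl_cons, ihl]
        by_cases hv : v = 0 <;> simp [List.count_cons, hv] <;> push_cast <;> omega
    rw [hrow]
    push_cast
    omega

-- ===== VERDICT (by name: the statement is the Claim_ definition above) =====
theorem solution_spec : Claim_equal_solution := by
  intro room viruses empty_locs walls M N hdom hpre
  unfold Spec_solution solution solution_alt
  apply List.foldl_ext
  intro best t ht
  dsimp only
  rw [← pv_spread_eq]
  rw [pv_count_eq _ 0]
  rw [Int.zero_add]
  split_ifs with hgt <;> omega
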